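-- pv_equiv track=rewrite | github.com/rikitrader/federal-trial-counsel | scripts/ftc_engine/drafter.py | generate_prayer
-- ===== SOURCE A (Python) =====
-- def generate_prayer(case_data: dict) -> str:
--     """Generate PRAYER FOR RELIEF."""
--     relief = case_data.get("relief_requested", [])
--     items = []
--     if "money" in relief:
--         items.append("a. Compensatory damages in an amount to be determined at trial;")
--         items.append("b. Punitive damages in an amount to be determined at trial;")
--     if "injunction" in relief:
--         items.append(f"{chr(97 + len(items))}. Preliminary and permanent injunctive relief;")
--     if "declaratory" in relief:
--         items.append(f"{chr(97 + len(items))}. A declaratory judgment;")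
--     items.append(f"{chr(97 + len(items))}. Pre-judgment and post-judgment interest;")
--     if "fees" in relief:
--         items.append(f"{chr(97 + len(items))}. Reasonable attorneys' fees and costs;")
--     items.append(f"{chr(97 + len(items))}. Such other and further relief as this Court deems just and proper.")
--
--     return "PRAYER FOR RELIEF\n\n     WHEREFORE, Plaintiff respectfully requests judgment as follows:\n\n" + "\n".join(f"     {i}" for i in items)
-- ===== SOURCE B (Python) =====
-- # Table-driven: a declarative menu of (required flag, clause texts) is filtered
-- # and flattened in one comprehension, then lettered by enumerate (no if-chain).
-- _MENU = [
--     ("money", ["Compensatory damages in an amount to be determined at trial;",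
--                "Punitive damages in an amount to be determined at trial;"]),
--     ("injunction", ["Preliminary and permanent injunctive relief;"]),
--     ("declaratory", ["A declaratory judgment;"]),
--     (None, ["Pre-judgment and post-judgment interest;"]),
--     ("fees", ["Reasonable attorneys' fees and costs;"]),
--     (None, ["Such other and further relief as this Court deems just and proper."]),
-- ]
--
-- def generate_prayer(case_data: dict) -> str:
--     """Generate PRAYER FOR RELIEF (data-driven table, filter+flatten, then letter)."""
--     relief = case_data.get("relief_requested", [])
--     clauses = [c for flag, texts in _MENU
--                  if flag is None or flag in relief
--                  for c in texts]
--     body = "\n".join("     %c. %s" % (chr(97 + i), c) for i, c in enumerate(clauses))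
--     return ("PRAYER FOR RELIEF\n\n     WHEREFORE, Plaintiff respectfully requests judgment as follows:\n\n"
--             + body)
-- ===== Notes on version B (the rewrite author's own statement) =====
-- stated objective: alternative
-- what changed: Replaces A's imperative if-chain that appends and letters clauses while tracking len(items) with a declarative table of (flag, clauses) rows filtered and flattened in one comprehension, then lettered uniformly by enumerate.
import Mathlib
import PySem

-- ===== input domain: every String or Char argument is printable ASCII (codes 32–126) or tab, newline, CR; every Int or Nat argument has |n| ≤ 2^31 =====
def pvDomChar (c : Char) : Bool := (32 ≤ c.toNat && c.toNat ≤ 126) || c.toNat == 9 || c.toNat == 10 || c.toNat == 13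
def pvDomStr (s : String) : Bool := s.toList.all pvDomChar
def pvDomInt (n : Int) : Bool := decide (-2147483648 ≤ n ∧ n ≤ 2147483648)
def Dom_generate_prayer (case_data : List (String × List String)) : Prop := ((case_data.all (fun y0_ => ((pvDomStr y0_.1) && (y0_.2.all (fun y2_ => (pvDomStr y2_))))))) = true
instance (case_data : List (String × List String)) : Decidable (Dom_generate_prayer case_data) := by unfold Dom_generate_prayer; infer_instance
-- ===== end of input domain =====

-- B replaces the imperative if-chain with a declarative flag/clause table,
-- filtered and flattened, then lettered by enumerate (alternative decomposition).

-- ===== PORT A =====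
-- literal transliteration of A: one pass that both selects and letters (chr(97+len(items)))
def generate_prayer (case_data : List (String × List String)) : String :=
  let relief := (PySem.Dict.mk case_data).getD "relief_requested" []
  let items : List String := []
  let items := if "money" ∈ relief then
      items ++ ["a. Compensatory damages in an amount to be determined at trial;",
                "b. Punitive damages in an amount to be determined at trial;"]
    else items
  let items := if "injunction" ∈ relief then
      items ++ [(Char.ofNat (97 + items.length)).toString ++ ". Preliminary and permanent injunctive relief;"]
    else items
  let items := if "declaratory" ∈ relief then
      items ++ [(Char.ofNat (97 + items.length)).toString ++ ". A declaratory judgment;"]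
    else items
  let items := items ++ [(Char.ofNat (97 + items.length)).toString ++ ". Pre-judgment and post-judgment interest;"]
  let items := if "fees" ∈ relief then
      items ++ [(Char.ofNat (97 + items.length)).toString ++ ". Reasonable attorneys' fees and costs;"]
    else items
  let items := items ++ [(Char.ofNat (97 + items.length)).toString ++ ". Such other and further relief as this Court deems just and proper."]
  "PRAYER FOR RELIEF\n\n     WHEREFORE, Plaintiff respectfully requests judgment as follows:\n\n" ++
    PySem.Str.join "\n" (items.map (fun i => "     " ++ i))

-- ===== PORT B =====
-- the declarative table of (required flag, clause texts); `none` = unconditional row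
def prayerMenu : List (Option String × List String) :=
  [ (some "money", ["Compensatory damages in an amount to be determined at trial;",
                    "Punitive damages in an amount to be determined at trial;"]),
    (some "injunction", ["Preliminary and permanent injunctive relief;"]),
    (some "declaratory", ["A declaratory judgment;"]),
    (none, ["Pre-judgment and post-judgment interest;"]),
    (some "fees", ["Reasonable attorneys' fees and costs;"]),
    (none, ["Such other and further relief as this Court deems just and proper."]) ]

def generate_prayer_alt (case_data : List (String × List String)) : String :=
  let relief := (PySem.Dict.mk case_data).getD "relief_requested" []
  -- filter+flatten comprehension: keep a row if its flag is none or present in relief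
  let clauses := prayerMenu.flatMap
      (fun p => if (match p.1 with | none => true | some f => decide (f ∈ relief)) = true then p.2 else [])
  let body := PySem.Str.join "\n"
      ((PySem.List.enumerate clauses 0).map
        (fun p => "     " ++ (Char.ofNat (97 + p.1.toNat)).toString ++ ". " ++ p.2))
  "PRAYER FOR RELIEF\n\n     WHEREFORE, Plaintiff respectfully requests judgment as follows:\n\n" ++ body

-- ===== PRECONDITION & SPEC =====
def Spec_generate_prayer (case_data : List (String × List String)) (out : String) : Prop := out = generate_prayer_alt case_data
instance (case_data : List (String × List String)) (out : String) : Decidable (Spec_generate_prayer case_data out) := by unfold Spec_generate_prayer; infer_instance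

-- ===== CLAIM (what is proved, stated in full; the proofs are below) =====
def Claim_equal_generate_prayer : Prop := ∀ (case_data : List (String × List String)), Dom_generate_prayer case_data → Spec_generate_prayer case_data (generate_prayer case_data)

-- ===== LEMMAS AND PROOFS =====

-- ===== VERDICT (by name: the statement is the Claim_ definition above) =====
set_option maxHeartbeats 1600000 in
theorem generate_prayer_spec : Claim_equal_generate_prayer := by
  intro case_data _
  unfold Spec_generate_prayer generate_prayer generate_prayer_alt prayerMenu
  set relief := (PySem.Dict.mk case_data).getD "relief_requested" [] with hr
  by_cases hm : "money" ∈ relief <;>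
  by_cases hi : "injunction" ∈ relief <;>
  by_cases hd : "declaratory" ∈ relief <;>
  by_cases hf : "fees" ∈ relief <;>
    simp only [List.flatMap_cons, List.flatMap_nil, decide_eq_true_eq, hm, hi, hd, hf,
      if_pos, if_neg, not_false_iff] <;>
    rfl
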